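-- pv_equiv track=rewrite | github.com/YoojLee/algorithms | greedy/guild.py | solution
-- ===== SOURCE A (Python) =====
-- def solution(arr):
--     answer = 0
--     arr.sort()
--     count = 0
--     for i in range(len(arr)):
--         count += 1
--         if count == arr[i]:
--             answer += 1
--             count = 0
--         else:
--             continue
--
--     return answer
-- ===== SOURCE B (Python) =====
-- def solution(arr):
--     # Run-based regrouping: process each block of equal fear levels arithmetically.
--     # (Sorts arr in place, like the original.)
--     arr.sort()
--     answer = 0
--     count = 0
--     i = 0
--     n = len(arr)
--     while i < n:
--         v = arr[i]
--         j = i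
--         while j < n and arr[j] == v:
--             j += 1
--         m = j - i
--         need = v - count
--         if 1 <= need <= m:
--             rem = m - need
--             answer += 1 + rem // v
--             count = rem % v
--         else:
--             count += m
--         i = j
--     return answer
-- ===== Notes on version B (the rewrite author's own statement) =====
-- stated objective: alternative
-- what changed: Replaces the per-person simulation loop with a scan over runs of equal sorted values, forming the groups in each run by division/modulus instead of counting one element at a time.
import Mathlib
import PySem

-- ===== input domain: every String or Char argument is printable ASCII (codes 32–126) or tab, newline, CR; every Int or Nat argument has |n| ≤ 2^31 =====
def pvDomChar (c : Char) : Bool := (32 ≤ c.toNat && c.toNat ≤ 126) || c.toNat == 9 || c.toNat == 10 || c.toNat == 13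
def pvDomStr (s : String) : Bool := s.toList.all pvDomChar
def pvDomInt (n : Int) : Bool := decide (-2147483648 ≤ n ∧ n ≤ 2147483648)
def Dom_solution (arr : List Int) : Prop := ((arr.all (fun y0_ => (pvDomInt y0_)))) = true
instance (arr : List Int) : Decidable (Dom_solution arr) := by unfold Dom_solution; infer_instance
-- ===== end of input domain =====

-- B regroups the sorted array by runs of equal values (division per run) instead of
-- simulating each person; equivalence is about the RETURN value (both sort arr in place).

-- ===== PORT A =====
def solution (arr : List Int) : Int :=
  let arr := PySem.List.sorted arr (fun x => x) false
  (arr.foldl (fun (st : Int × Int) a =>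
      let count := st.2 + 1
      if count = a then (st.1 + 1, 0) else (st.1, count)) (0, 0)).1

-- ===== PORT B =====
def solutionAltLoop : List Int → Int → Int → Int
  | [], answer, _ => answer
  | v :: rest, answer, count =>
    let run := rest.takeWhile (fun x => x == v)
    let tail := rest.dropWhile (fun x => x == v)
    let m : Int := 1 + run.length
    let need := v - count
    if 1 ≤ need ∧ need ≤ m then
      solutionAltLoop tail (answer + 1 + PySem.Int.floordiv (m - need) v)
        (PySem.Int.mod (m - need) v)
    else
      solutionAltLoop tail answer (count + m)
  termination_by l => l.length
  decreasing_by all_goals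
    simp only [List.length_cons]
    exact Nat.lt_succ_of_le (List.length_dropWhile_le _ _)

def solution_alt (arr : List Int) : Int :=
  solutionAltLoop (PySem.List.sorted arr (fun x => x) false) 0 0

-- ===== PRECONDITION & SPEC =====
def Spec_solution (arr : List Int) (out : Int) : Prop := out = solution_alt arr
instance (arr : List Int) (out : Int) : Decidable (Spec_solution arr out) := by unfold Spec_solution; infer_instance

-- ===== CLAIM (what is proved, stated in full; the proofs are below) =====
def Claim_equal_solution : Prop := ∀ (arr : List Int), Dom_solution arr → Spec_solution arr (solution arr)

-- ===== LEMMAS AND PROOFS =====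

def stepA (st : Int × Int) (a : Int) : Int × Int :=
  let count := st.2 + 1
  if count = a then (st.1 + 1, 0) else (st.1, count)

theorem ediv_emod_shift (v k : Int) (hv : 0 < v) :
    (k + v) / v = k / v + 1 ∧ (k + v) % v = k % v := by
  have h1 : k + v = k + 1 * v := by ring
  rw [h1, Int.add_mul_ediv_right _ _ (by omega : v ≠ 0), Int.add_mul_emod_self_right]
  exact ⟨rfl, rfl⟩

-- folding A's step over m copies of v equals B's run arithmetic
theorem foldl_stepA_replicate (m : Nat) (v ans c : Int) (hc : 0 ≤ c) :
    (List.replicate m v).foldl stepA (ans, c) =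
      if 1 ≤ v - c ∧ v - c ≤ (m : Int) then
        (ans + 1 + PySem.Int.floordiv ((m : Int) - (v - c)) v,
         PySem.Int.mod ((m : Int) - (v - c)) v)
      else (ans, c + m) := by
  induction m generalizing ans c with
  | zero => simp; omega
  | succ n ih =>
    rw [List.replicate_succ, List.foldl_cons]
    by_cases h : c + 1 = v
    · have hv : 0 < v := by omega
      have hstep : stepA (ans, c) v = (ans + 1, 0) := by simp [stepA, h]
      rw [hstep, ih (ans + 1) 0 le_rfl]
      have hcond : (1 ≤ v - c ∧ v - c ≤ ((n + 1 : Nat) : Int)) := by push_cast; omega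
      rw [if_pos hcond]
      simp only [PySem.Int.floordiv_eq_ediv_of_pos hv, PySem.Int.mod_eq_emod_of_pos hv]
      by_cases hn : v ≤ (n : Int)
      · have hcond2 : (1 ≤ v - 0 ∧ v - 0 ≤ (n : Int)) := by omega
        rw [if_pos hcond2]
        have e1 : ((n + 1 : Nat) : Int) - (v - c) = ((n : Int) - (v - 0)) + v := by
          push_cast; omega
        rw [e1, (ediv_emod_shift v _ hv).1, (ediv_emod_shift v _ hv).2]
        simp only [Prod.mk.injEq]
        refine ⟨by ring, by trivial⟩
      · have hcond2 : ¬ (1 ≤ v - 0 ∧ v - 0 ≤ (n : Int)) := by omega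
        rw [if_neg hcond2]
        have e1 : ((n + 1 : Nat) : Int) - (v - c) = (n : Int) := by push_cast; omega
        rw [e1, Int.ediv_eq_zero_of_lt (by omega) (by omega),
            Int.emod_eq_of_lt (by omega) (by omega)]
        simp only [Prod.mk.injEq]
        constructor <;> omega
    · have hstep : stepA (ans, c) v = (ans, c + 1) := by simp [stepA, h]
      rw [hstep, ih ans (c + 1) (by omega)]
      by_cases hcond : (1 ≤ v - (c + 1) ∧ v - (c + 1) ≤ (n : Int))
      · rw [if_pos hcond, if_pos (by push_cast at hcond ⊢; omega)]
        have e2 : (n : Int) - (v - (c + 1)) = ((n + 1 : Nat) : Int) - (v - c) := by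
          push_cast; omega
        rw [e2]
      · rw [if_neg hcond, if_neg (by push_cast at hcond ⊢; omega)]
        have e3 : c + 1 + (n : Int) = c + ((n + 1 : Nat) : Int) := by push_cast; ring
        rw [e3]

theorem takeWhile_beq_replicate (v : Int) (l : List Int) :
    l.takeWhile (fun x => x == v) = List.replicate (l.takeWhile (fun x => x == v)).length v := by
  apply List.eq_replicate_of_mem
  intro b hb
  have := List.mem_takeWhile_imp hb
  simpa using this

theorem solutionAltLoop_eq_aux (n : Nat) : ∀ (l : List Int), l.length ≤ n → ∀ (ans c : Int),
    0 ≤ c → solutionAltLoop l ans c = (l.foldl stepA (ans, c)).1 := by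
  induction n with
  | zero =>
    intro l hl ans c hc
    have : l = [] := List.eq_nil_of_length_eq_zero (Nat.le_zero.mp hl)
    simp [this, solutionAltLoop]
  | succ n ih =>
    intro l hl ans c hc
    match l with
    | [] => simp [solutionAltLoop]
    | v :: rest =>
      rw [solutionAltLoop]
      have hsplit : v :: rest =
          List.replicate (1 + (rest.takeWhile (fun x => x == v)).length) v ++
            rest.dropWhile (fun x => x == v) := by
        conv_lhs => rw [← List.takeWhile_append_dropWhile (p := fun x => x == v) (l := rest)]
        rw [Nat.add_comm, List.replicate_succ]
        simp [← takeWhile_beq_replicate]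
      have htail : (rest.dropWhile (fun x => x == v)).length ≤ n := by
        have := List.length_dropWhile_le (p := fun x => x == v) (l := rest)
        simp at hl; omega
      conv_rhs => rw [hsplit]
      rw [List.foldl_append,
          foldl_stepA_replicate (1 + (rest.takeWhile (fun x => x == v)).length) v ans c hc]
      have hmc : (1 : Int) + ((rest.takeWhile (fun x => x == v)).length : Int)
          = ((1 + (rest.takeWhile (fun x => x == v)).length : Nat) : Int) := by push_cast; ring
      simp only [hmc]
      by_cases hcond : 1 ≤ v - c ∧
          v - c ≤ ((1 + (rest.takeWhile (fun x => x == v)).length : Nat) : Int)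
      · rw [if_pos hcond, if_pos hcond]
        have hv : 0 < v := by omega
        have hmod : 0 ≤ PySem.Int.mod
            (((1 + (rest.takeWhile (fun x => x == v)).length : Nat) : Int) - (v - c)) v := by
          rw [PySem.Int.mod_eq_emod_of_pos hv]
          exact Int.emod_nonneg _ (by omega)
        exact ih _ htail _ _ hmod
      · rw [if_neg hcond, if_neg hcond]
        have hnn : (0 : Int) ≤ ((1 + (rest.takeWhile (fun x => x == v)).length : Nat) : Int) :=
          Int.natCast_nonneg _
        exact ih _ htail _ _ (by omega)

-- ===== VERDICT (by name: the statement is the Claim_ definition above) =====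
theorem solution_spec : Claim_equal_solution := by
  intro arr _
  unfold Spec_solution solution solution_alt
  rw [solutionAltLoop_eq_aux _ _ le_rfl 0 0 le_rfl]
  rfl
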